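-- pv_equiv track=rewrite | github.com/sokrasins/dicecalc | test/collect_entropy.py | reduce_bin_to_byte
-- ===== SOURCE A (Python) =====
-- def reduce_bin_to_byte(bin_list):
--     bin_chunks = [bin_list[i:i+8] for i in range(0, len(bin_list), 8)]
--
--     byte_array = []
--     for chunk in bin_chunks:
--         byte_val = 0
--         for place, bin_val in enumerate(chunk):
--             byte_val += bin_val << (7-place)
--         byte_array.append(byte_val)
--
--     return byte_array
-- ===== SOURCE B (Python) =====
-- def reduce_bin_to_byte(bin_list):
--     byte_array = []
--     byte_val = 0
--     for i, v in enumerate(bin_list):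
--         byte_val += v << (7 - i % 8)
--         if i % 8 == 7:
--             byte_array.append(byte_val)
--             byte_val = 0
--     if len(bin_list) % 8 != 0:
--         byte_array.append(byte_val)
--     return byte_array
-- ===== Notes on version B (the rewrite author's own statement) =====
-- stated objective: simpler
-- what changed: Replaces the intermediate chunk list plus nested per-chunk loop with a single streaming pass over enumerate(bin_list) that accumulates one running byte and flushes it at each 8-bit boundary (plus a final partial flush).
import Mathlib
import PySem

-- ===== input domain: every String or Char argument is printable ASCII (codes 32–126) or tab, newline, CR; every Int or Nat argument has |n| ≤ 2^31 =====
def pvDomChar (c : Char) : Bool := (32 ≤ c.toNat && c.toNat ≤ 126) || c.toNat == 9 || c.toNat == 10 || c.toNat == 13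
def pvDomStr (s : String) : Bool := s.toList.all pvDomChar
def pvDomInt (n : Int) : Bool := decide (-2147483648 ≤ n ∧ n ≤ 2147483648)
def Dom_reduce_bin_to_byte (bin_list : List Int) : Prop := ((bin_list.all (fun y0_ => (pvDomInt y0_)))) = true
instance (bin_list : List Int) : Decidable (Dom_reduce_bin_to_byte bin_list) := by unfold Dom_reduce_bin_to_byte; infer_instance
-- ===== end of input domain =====

-- B replaces A's intermediate chunk list + nested per-chunk loop by one streaming pass that
-- flushes a running byte at each 8-bit boundary (simpler decomposition, same O(n) cost).

-- ===== PORT A =====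
-- literal port of A: build the chunk list with range(0, len, 8) and slices, then for each
-- chunk sum bin_val << (7-place); place ∈ {0..7} so (7 - place).toNat is Python's 7-place exactly
def reduce_bin_to_byte (bin_list : List Int) : List Int :=
  let bin_chunks := (PySem.List.pyRange 0 (bin_list.length : Int) 8).map
    (fun i => PySem.List.slice bin_list (some i) (some (i + 8)))
  bin_chunks.foldl
    (fun byte_array chunk =>
      byte_array ++
        [(PySem.List.enumerate chunk).foldl
          (fun byte_val pv => byte_val + pv.2 <<< (7 - pv.1).toNat) 0]) []

-- ===== PORT B =====
-- literal port of Source B: one fold over enumerate(bin_list) carrying (byte_array, byte_val),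
-- flushing when i % 8 == 7, plus a final partial flush when len(bin_list) % 8 != 0
def reduce_bin_to_byte_alt (bin_list : List Int) : List Int :=
  let st := (PySem.List.enumerate bin_list).foldl
    (fun (st : List Int × Int) (iv : Int × Int) =>
      let byte_val := st.2 + iv.2 <<< (7 - PySem.Int.mod iv.1 8).toNat
      if PySem.Int.mod iv.1 8 == 7 then (st.1 ++ [byte_val], 0) else (st.1, byte_val))
    ([], 0)
  if PySem.Int.mod (bin_list.length : Int) 8 ≠ 0 then st.1 ++ [st.2] else st.1

-- ===== PRECONDITION & SPEC =====
def Spec_reduce_bin_to_byte (bin_list : List Int) (out : List Int) : Prop := out = reduce_bin_to_byte_alt bin_list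
instance (bin_list : List Int) (out : List Int) : Decidable (Spec_reduce_bin_to_byte bin_list out) := by unfold Spec_reduce_bin_to_byte; infer_instance

-- ===== CLAIM (what is proved, stated in full; the proofs are below) =====
def Claim_equal_reduce_bin_to_byte : Prop := ∀ (bin_list : List Int), Dom_reduce_bin_to_byte bin_list → Spec_reduce_bin_to_byte bin_list (reduce_bin_to_byte bin_list)

-- ===== LEMMAS AND PROOFS =====

-- the value A computes for one chunk (A's inner loop as a function)
def byteOf (chunk : List Int) : Int :=
  (PySem.List.enumerate chunk).foldl (fun byte_val pv => byte_val + pv.2 <<< (7 - pv.1).toNat) 0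

-- B's loop body, named for the proofs
def bStep (st : List Int × Int) (iv : Int × Int) : List Int × Int :=
  let byte_val := st.2 + iv.2 <<< (7 - PySem.Int.mod iv.1 8).toNat
  if PySem.Int.mod iv.1 8 == 7 then (st.1 ++ [byte_val], 0) else (st.1, byte_val)

-- common shape: full-chunk bytes and the leftover partial byte
def Bcore (l : List Int) : List Int × Int :=
  if h : l = [] then ([], 0)
  else if h8 : 8 ≤ l.length then
    let p := Bcore (l.drop 8)
    (byteOf (l.take 8) :: p.1, p.2)
  else ([], byteOf l)
termination_by l.length
decreasing_by
  have : l.length ≠ 0 := fun hn => h (List.eq_nil_of_length_eq_zero hn)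
  simp; omega

def assemble (l : List Int) : List Int :=
  if PySem.Int.mod (l.length : Int) 8 ≠ 0 then (Bcore l).1 ++ [(Bcore l).2] else (Bcore l).1

lemma sliceTake (l : List Int) : PySem.List.slice l (some 0) (some 8) = l.take 8 := by
  simp only [PySem.List.slice, PySem.List.clampIdx]
  rw [if_neg (by omega), if_neg (by omega)]
  rw [show ((0:Int).toNat) = 0 from rfl, show ((8:Int).toNat) = 8 from rfl]
  simp only [Nat.min_comm 0, Nat.min_zero, List.drop_zero, Nat.sub_zero]
  rw [List.take_eq_take_iff]
  omega

lemma sliceShift (l : List Int) (i : Int) (hi : 0 ≤ i) (h8 : 8 ≤ l.length) :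
    PySem.List.slice l (some (i + 8)) (some (i + 16)) =
    PySem.List.slice (l.drop 8) (some i) (some (i + 8)) := by
  simp only [PySem.List.slice, PySem.List.clampIdx, List.length_drop]
  rw [if_neg (by omega), if_neg (by omega), if_neg (by omega), if_neg (by omega)]
  rw [List.drop_drop]
  have h1 : min (i + 8).toNat l.length = min i.toNat (l.length - 8) + 8 := by omega
  rw [h1, Nat.add_comm (min i.toNat (l.length - 8)) 8]
  congr 1
  omega

lemma chunkA (l : List Int) (h : l ≠ []) :
    (PySem.List.pyRange 0 (l.length : Int) 8).map
      (fun i => PySem.List.slice l (some i) (some (i + 8)))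
    = l.take 8 :: (PySem.List.pyRange 0 ((l.drop 8).length : Int) 8).map
      (fun i => PySem.List.slice (l.drop 8) (some i) (some (i + 8))) := by
  have hn : 0 < l.length := List.length_pos_of_ne_nil h
  rw [PySem.List.pyRange_of_pos 0 _ (by norm_num : (0:Int) < 8),
      PySem.List.pyRange_of_pos 0 _ (by norm_num : (0:Int) < 8)]
  have hcast : ∀ m : Nat, (((m:Int) - 0 + 8 - 1) / 8).toNat = (m + 7) / 8 := by
    intro m
    have h1 : ((m:Int) - 0 + 8 - 1) = ((m + 7 : Nat) : Int) := by push_cast; ring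
    rw [h1, show (8:Int) = ((8:Nat):Int) from rfl, ← Int.natCast_div, Int.toNat_natCast]
  have hc1 : (if (0:Int) < (l.length:Int) then (((l.length:Int) - 0 + 8 - 1) / 8).toNat else 0)
      = (l.length - 1) / 8 + 1 := by
    rw [if_pos (by exact_mod_cast hn), hcast]
    rw [show l.length + 7 = (l.length - 1) + 8 by omega, Nat.add_div_right _ (by norm_num)]
  have hlen : (l.drop 8).length = l.length - 8 := by simp
  have hc2 : (if (0:Int) < ((l.drop 8).length:Int) then
      ((((l.drop 8).length:Int) - 0 + 8 - 1) / 8).toNat else 0) = (l.length - 1) / 8 := by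
    by_cases h8 : l.length ≤ 8
    · have h0 : l.length - 8 = 0 := by omega
      rw [if_neg (by rw [hlen, h0]; norm_num)]
      have : (l.length - 1) / 8 = 0 := Nat.div_eq_of_lt (by omega)
      omega
    · rw [if_pos (by rw [hlen]; exact_mod_cast Nat.lt_of_lt_of_le (by norm_num) (by omega : 1 ≤ l.length - 8)), hcast, hlen]
      congr 1
      omega
  rw [hc1, hc2, List.range_succ_eq_map, List.map_cons, List.map_cons]
  simp only [List.map_map]
  congr 1
  · rw [show ((0:Int) + 8 * ((0:Nat):Int)) = 0 by norm_num]
    rw [show ((0:Int) + 8) = 8 by norm_num]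
    exact sliceTake l
  · apply List.map_congr_left
    intro k hk
    have hk' : k < (l.length - 1) / 8 := List.mem_range.mp hk
    have h8 : 8 ≤ l.length := by
      rcases Nat.le_total 8 l.length with h8 | h8
      · exact h8
      · exfalso; have : (l.length - 1) / 8 = 0 := Nat.div_eq_of_lt (by omega); omega
    simp only [Function.comp_apply]
    have e1 : (0:Int) + 8 * ((Nat.succ k : Nat):Int) = 8 * (k:Int) + 8 := by push_cast; ring
    have e2 : (0:Int) + 8 * ((Nat.succ k : Nat):Int) + 8 = 8 * (k:Int) + 16 := by push_cast; ring
    have e3 : (0:Int) + 8 * ((k:Nat):Int) = 8 * (k:Int) := by ring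
    have e4 : (0:Int) + 8 * ((k:Nat):Int) + 8 = 8 * (k:Int) + 8 := by ring
    rw [e2, e1, e3]
    exact sliceShift l (8 * (k:Int)) (by positivity) h8

lemma hmod8 (m : Nat) : PySem.Int.mod (m:Int) 8 = ((m % 8 : Nat) : Int) := by
  exact_mod_cast PySem.Int.mod_natCast m 8

-- assembling one leading chunk
lemma assemble_cons (l : List Int) (h : l ≠ []) :
    assemble l = byteOf (l.take 8) :: assemble (l.drop 8) := by
  by_cases h8 : 8 ≤ l.length
  · have hB : Bcore l = (byteOf (l.take 8) :: (Bcore (l.drop 8)).1, (Bcore (l.drop 8)).2) := by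
      rw [Bcore]; rw [dif_neg h, dif_pos h8]
    have hlen : (l.drop 8).length = l.length - 8 := by simp
    unfold assemble
    rw [hB, hlen, hmod8, hmod8, show l.length % 8 = (l.length - 8) % 8 by omega]
    split_ifs <;> simp
  · have hd : l.drop 8 = [] := List.drop_eq_nil_of_le (by omega)
    have ht : l.take 8 = l := List.take_of_length_le (by omega)
    have hp : 0 < l.length := List.length_pos_of_ne_nil h
    have hB : Bcore l = ([], byteOf l) := by
      rw [Bcore]; rw [dif_neg h, dif_neg h8]
    have hnil : assemble [] = ([] : List Int) := by simp [assemble, Bcore]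
    rw [hd, ht, hnil]
    unfold assemble
    rw [hB, if_pos (by rw [hmod8]; simp; omega)]
    rfl

lemma A_eq_assemble (l : List Int) : reduce_bin_to_byte l = assemble l := by
  generalize hn : l.length = n
  induction n using Nat.strong_induction_on generalizing l with
  | _ n ih =>
  by_cases h : l = []
  · subst h; simp [reduce_bin_to_byte, assemble, Bcore]; decide
  · have hA : ∀ t : List Int, reduce_bin_to_byte t =
        ((PySem.List.pyRange 0 (t.length : Int) 8).map
          (fun i => PySem.List.slice t (some i) (some (i + 8)))).map byteOf := by
      intro t
      have h0 : reduce_bin_to_byte t =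
          List.foldl (fun acc chunk => acc ++ [byteOf chunk]) []
            ((PySem.List.pyRange 0 (t.length : Int) 8).map
              (fun i => PySem.List.slice t (some i) (some (i + 8)))) := rfl
      rw [h0, PySem.List.foldl_append_singleton_eq_map]
      simp
    have hp : 0 < l.length := List.length_pos_of_ne_nil h
    rw [hA l, chunkA l h, List.map_cons, ← hA (l.drop 8)]
    rw [ih (l.drop 8).length (by simp; omega) (l.drop 8) rfl, ← assemble_cons l h]

lemma shiftInv (l : List Int) (i0 : Int) (st : List Int × Int) :
    (PySem.List.enumerate l (i0 + 8)).foldl bStep st =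
    (PySem.List.enumerate l i0).foldl bStep st := by
  induction l generalizing i0 st with
  | nil => rfl
  | cons x t ih =>
    have hm : PySem.Int.mod (i0 + 8) 8 = PySem.Int.mod i0 8 := by
      rw [PySem.Int.mod_eq_emod_of_pos (by norm_num), PySem.Int.mod_eq_emod_of_pos (by norm_num)]
      omega
    simp only [PySem.List.enumerate, List.foldl]
    rw [show i0 + 8 + 1 = (i0 + 1) + 8 by ring, ih]
    congr 1
    simp only [bStep, hm]

lemma Bfold (n : Nat) : ∀ (l : List Int) (out : List Int), l.length = n →
    (PySem.List.enumerate l).foldl bStep (out, 0) = (out ++ (Bcore l).1, (Bcore l).2) := by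
  induction n using Nat.strong_induction_on with
  | _ n ih =>
  intro l out hn
  rcases l with _ | ⟨x0, _ | ⟨x1, _ | ⟨x2, _ | ⟨x3, _ | ⟨x4, _ | ⟨x5, _ | ⟨x6, _ | ⟨x7, rest⟩⟩⟩⟩⟩⟩⟩⟩
  · simp [Bcore]
  · simp [Bcore, PySem.List.enumerate, bStep, byteOf]
  · simp [Bcore, PySem.List.enumerate, bStep, byteOf]
  · simp [Bcore, PySem.List.enumerate, bStep, byteOf]
  · simp [Bcore, PySem.List.enumerate, bStep, byteOf]
  · simp [Bcore, PySem.List.enumerate, bStep, byteOf]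
  · simp [Bcore, PySem.List.enumerate, bStep, byteOf]
  · simp [Bcore, PySem.List.enumerate, bStep, byteOf]
  · have key : (PySem.List.enumerate (x0::x1::x2::x3::x4::x5::x6::x7::rest)).foldl bStep (out, 0) =
        (PySem.List.enumerate rest 8).foldl bStep (out ++ [byteOf [x0,x1,x2,x3,x4,x5,x6,x7]], 0) := by
      simp [PySem.List.enumerate, bStep, byteOf]
    have hrest : rest.length < n := by simp at hn; omega
    rw [key, show (8:Int) = 0 + 8 by norm_num, shiftInv, ih rest.length hrest rest _ rfl]
    have hB : Bcore (x0::x1::x2::x3::x4::x5::x6::x7::rest) =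
        (byteOf [x0,x1,x2,x3,x4,x5,x6,x7] :: (Bcore rest).1, (Bcore rest).2) := by
      rw [Bcore]
      rw [dif_neg (by simp), dif_pos (by simp)]
      simp [List.take, List.drop]
    rw [hB]
    simp

lemma B_eq_assemble (l : List Int) : reduce_bin_to_byte_alt l = assemble l := by
  have hdef : reduce_bin_to_byte_alt l =
      (if PySem.Int.mod (l.length : Int) 8 ≠ 0 then
        ((PySem.List.enumerate l).foldl bStep ([], 0)).1 ++
          [((PySem.List.enumerate l).foldl bStep ([], 0)).2]
      else ((PySem.List.enumerate l).foldl bStep ([], 0)).1) := rfl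
  rw [hdef, Bfold l.length l [] rfl]
  unfold assemble
  simp

-- ===== VERDICT (by name: the statement is the Claim_ definition above) =====
theorem reduce_bin_to_byte_spec : Claim_equal_reduce_bin_to_byte := by
  intro l _
  unfold Spec_reduce_bin_to_byte
  rw [A_eq_assemble, B_eq_assemble]
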